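-- pv_equiv track=rewrite | github.com/pedrocavalcanti-dev/MoonShield-Sensor | suricata/instalador.py | _patch_home_net
-- ===== SOURCE A (Python) =====
-- def _patch_home_net(conteudo: str, home_net: list) -> str:
--     if not home_net:
--         return conteudo
--
--     valor     = "[" + ",".join(home_net) + "]"
--     nova_line = f'    HOME_NET: "{valor}"'
--
--     linhas = conteudo.split("\n")
--     nova   = []
--     ok     = False
--
--     for linha in linhas:
--         if linha.strip().startswith("HOME_NET:"):
--             nova.append(nova_line)
--             ok = True
--         else:
--             nova.append(linha)
--
--     if not ok:
--         nova2 = []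
--         for linha in nova:
--             nova2.append(linha)
--             if "address-groups:" in linha:
--                 nova2.append(nova_line)
--                 ok = True
--         nova = nova2
--
--     if not ok:
--         nova += ["\nvars:", "  address-groups:", nova_line]
--
--     return "\n".join(nova)
-- ===== SOURCE B (Python) =====
-- def _patch_home_net(conteudo: str, home_net: list) -> str:
--     # Speculative single pass: build BOTH candidate outputs (replace-variant and
--     # insert-variant) and both presence flags in one sweep, then select at the end.
--     if not home_net:
--         return conteudo
--
--     nova_line = '    HOME_NET: "[' + ",".join(home_net) + ']"'
--
--     rep = []            # every HOME_NET line swapped for nova_line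
--     ins = []            # nova_line inserted after every address-groups line
--     saw_home = False
--     saw_grp = False
--     for l in conteudo.split("\n"):
--         home = l.strip().startswith("HOME_NET:")
--         grp = "address-groups:" in l
--         rep.append(nova_line if home else l)
--         ins.append(l)
--         if grp:
--             ins.append(nova_line)
--         saw_home = saw_home or home
--         saw_grp = saw_grp or grp
--
--     if saw_home:
--         saida = rep
--     elif saw_grp:
--         saida = ins
--     else:
--         # no HOME_NET line, so rep is the original lines unchanged
--         saida = rep + ["\nvars:", "  address-groups:", nova_line]
--     return "\n".join(saida)
-- ===== Notes on version B (the rewrite author's own statement) =====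
-- stated objective: alternative
-- what changed: B makes one speculative sweep that simultaneously builds both candidate outputs (the replace-variant and the insert-after-groups variant) together with the two presence flags, and only selects which candidate to emit at the end, instead of A's staged build-then-reprocess passes driven by a mutated ok flag.
import Mathlib
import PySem

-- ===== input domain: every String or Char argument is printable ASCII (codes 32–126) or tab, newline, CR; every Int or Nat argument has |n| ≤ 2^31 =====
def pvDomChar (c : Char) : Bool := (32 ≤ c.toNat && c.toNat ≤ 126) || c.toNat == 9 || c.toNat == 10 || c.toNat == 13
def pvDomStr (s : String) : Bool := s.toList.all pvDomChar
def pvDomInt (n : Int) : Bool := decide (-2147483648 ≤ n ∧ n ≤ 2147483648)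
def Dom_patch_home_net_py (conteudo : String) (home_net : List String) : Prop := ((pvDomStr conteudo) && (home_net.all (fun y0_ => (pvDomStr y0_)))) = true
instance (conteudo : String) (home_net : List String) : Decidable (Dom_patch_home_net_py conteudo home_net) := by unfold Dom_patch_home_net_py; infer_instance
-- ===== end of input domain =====

-- B builds both candidate outputs and both presence flags in one speculative sweep and
-- selects at the end, instead of A's staged passes with an ok flag; same value (alternative).

-- the exact line tests both Pythons perform
def pvIsHome (l : String) : Bool := PySem.Str.startswith (PySem.Str.strip l) "HOME_NET:"
def pvIsGrp (l : String) : Bool := PySem.Str.isIn "address-groups:" l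

-- ===== PORT A =====
-- conteudo.split("\n"): sep is the nonempty literal "\n", so split? is always some; .getD [] is exact.
def patch_home_net_py (conteudo : String) (home_net : List String) : String :=
  if home_net = [] then conteudo
  else
    let valor : String := "[" ++ PySem.Str.join "," home_net ++ "]"
    let nova_line : String := "    HOME_NET: \"" ++ valor ++ "\""
    let linhas : List String := (PySem.Str.split? conteudo "\n").getD []
    let st : List String × Bool := linhas.foldl (fun s linha =>
      if pvIsHome linha then (s.1 ++ [nova_line], true)
      else (s.1 ++ [linha], s.2)) ([], false)
    let st2 : List String × Bool :=
      if st.2 then st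
      else st.1.foldl (fun s linha =>
        if pvIsGrp linha then (s.1 ++ [linha, nova_line], true)
        else (s.1 ++ [linha], s.2)) ([], false)
    let nova : List String :=
      if st2.2 then st2.1 else st2.1 ++ ["\nvars:", "  address-groups:", nova_line]
    PySem.Str.join "\n" nova

-- ===== PORT B =====
def patch_home_net_py_alt (conteudo : String) (home_net : List String) : String :=
  if home_net = [] then conteudo
  else
    let nova_line : String := "    HOME_NET: \"[" ++ PySem.Str.join "," home_net ++ "]\""
    let linhas : List String := (PySem.Str.split? conteudo "\n").getD []
    let st : List String × List String × Bool × Bool := linhas.foldl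
      (fun (s : List String × List String × Bool × Bool) l =>
        let home := pvIsHome l
        let grp := pvIsGrp l
        (s.1 ++ [if home then nova_line else l],
         s.2.1 ++ (if grp then [l, nova_line] else [l]),
         s.2.2.1 || home,
         s.2.2.2 || grp)) ([], [], false, false)
    let saida : List String :=
      if st.2.2.1 then st.1
      else if st.2.2.2 then st.2.1
      else st.1 ++ ["\nvars:", "  address-groups:", nova_line]
    PySem.Str.join "\n" saida

-- ===== PRECONDITION & SPEC =====
def Spec_patch_home_net_py (conteudo : String) (home_net : List String) (out : String) : Prop := out = patch_home_net_py_alt conteudo home_net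
instance (conteudo : String) (home_net : List String) (out : String) : Decidable (Spec_patch_home_net_py conteudo home_net out) := by unfold Spec_patch_home_net_py; infer_instance

-- ===== CLAIM (what is proved, stated in full; the proofs are below) =====
def Claim_equal_patch_home_net_py : Prop := ∀ (conteudo : String) (home_net : List String), Dom_patch_home_net_py conteudo home_net → Spec_patch_home_net_py conteudo home_net (patch_home_net_py conteudo home_net)

-- ===== LEMMAS AND PROOFS =====

-- A's first loop, characterised: a map with an any-flag.
theorem pv_fold1 (P : String → Bool) (nv : String) (linhas acc : List String) (b : Bool) :
    linhas.foldl (fun (s : List String × Bool) linha =>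
      if P linha then (s.1 ++ [nv], true) else (s.1 ++ [linha], s.2)) (acc, b)
    = (acc ++ linhas.map (fun l => if P l then nv else l), b || linhas.any P) := by
  induction linhas generalizing acc b with
  | nil => simp
  | cons h t ih =>
    simp only [List.foldl_cons, List.map_cons, List.any_cons]
    by_cases hp : P h = true
    · simp [hp, ih]
    · simp only [Bool.not_eq_true] at hp
      simp [hp, ih, List.append_assoc]

-- A's second loop, characterised: a flatMap with an any-flag.
theorem pv_fold2 (Q : String → Bool) (nv : String) (linhas acc : List String) (b : Bool) :
    linhas.foldl (fun (s : List String × Bool) linha =>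
      if Q linha then (s.1 ++ [linha, nv], true) else (s.1 ++ [linha], s.2)) (acc, b)
    = (acc ++ linhas.flatMap (fun l => if Q l then [l, nv] else [l]), b || linhas.any Q) := by
  induction linhas generalizing acc b with
  | nil => simp
  | cons h t ih =>
    simp only [List.foldl_cons, List.flatMap_cons, List.any_cons]
    by_cases hq : Q h = true
    · simp [hq, ih, List.append_assoc]
    · simp only [Bool.not_eq_true] at hq
      simp [hq, ih, List.append_assoc]

-- B's speculative sweep, characterised: the map, the flatMap and the two any-flags at once.
theorem pv_foldB (P Q : String → Bool) (nv : String) (linhas r i : List String) (b1 b2 : Bool) :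
    linhas.foldl (fun (s : List String × List String × Bool × Bool) l =>
      (s.1 ++ [if P l then nv else l],
       s.2.1 ++ (if Q l then [l, nv] else [l]),
       s.2.2.1 || P l,
       s.2.2.2 || Q l)) (r, i, b1, b2)
    = (r ++ linhas.map (fun l => if P l then nv else l),
       i ++ linhas.flatMap (fun l => if Q l then [l, nv] else [l]),
       b1 || linhas.any P,
       b2 || linhas.any Q) := by
  induction linhas generalizing r i b1 b2 with
  | nil => simp
  | cons h t ih =>
    simp only [List.foldl_cons, List.map_cons, List.flatMap_cons, List.any_cons]
    rw [ih]
    simp [List.append_assoc, Bool.or_assoc]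

theorem pv_map_id (P : String → Bool) (nv : String) (linhas : List String)
    (h : linhas.any P = false) :
    linhas.map (fun l => if P l then nv else l) = linhas := by
  induction linhas with
  | nil => rfl
  | cons x t ih =>
    simp only [List.any_cons, Bool.or_eq_false_iff] at h
    simp [h.1, ih h.2]

theorem pv_flatMap_id (Q : String → Bool) (nv : String) (linhas : List String)
    (h : linhas.any Q = false) :
    linhas.flatMap (fun l => if Q l then [l, nv] else [l]) = linhas := by
  induction linhas with
  | nil => rfl
  | cons x t ih =>
    simp only [List.any_cons, Bool.or_eq_false_iff] at h
    simp [List.flatMap_cons, h.1, ih h.2]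

-- ===== VERDICT (by name: the statement is the Claim_ definition above) =====
theorem patch_home_net_py_spec : Claim_equal_patch_home_net_py := by
  intro conteudo home_net _
  show patch_home_net_py conteudo home_net = patch_home_net_py_alt conteudo home_net
  by_cases hn : home_net = []
  · simp [patch_home_net_py, patch_home_net_py_alt, hn]
  · simp only [patch_home_net_py, patch_home_net_py_alt, if_neg hn]
    have hnv : ("    HOME_NET: \"" ++ ("[" ++ PySem.Str.join "," home_net ++ "]") ++ "\"" : String)
        = "    HOME_NET: \"[" ++ PySem.Str.join "," home_net ++ "]\"" := by
      refine String.ext ?_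
      simp
    rw [hnv]
    generalize ("    HOME_NET: \"[" ++ PySem.Str.join "," home_net ++ "]\"" : String) = nv
    generalize ((PySem.Str.split? conteudo "\n").getD []) = linhas
    rw [pv_fold1 pvIsHome nv linhas [] false,
        pv_foldB pvIsHome pvIsGrp nv linhas [] [] false false]
    by_cases hH : linhas.any pvIsHome = true
    · simp [hH]
    · simp only [Bool.not_eq_true] at hH
      simp only [List.nil_append, hH, Bool.false_or, if_neg Bool.false_ne_true]
      rw [pv_map_id pvIsHome nv linhas hH,
          pv_fold2 pvIsGrp nv linhas [] false]
      by_cases hG : linhas.any pvIsGrp = true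
      · simp [hG]
      · simp only [Bool.not_eq_true] at hG
        simp [hG, pv_flatMap_id pvIsGrp nv linhas hG]
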